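-- pv_equiv track=rewrite | github.com/graceebc9/uk_epc_postcodes | src/col_mappings.py | map_to_meta_age_band
-- ===== SOURCE A (Python) =====
-- def map_to_meta_age_band(column_name):
--     """
--     Maps construction age band column names to simplified meta categories.
--
--     Args:
--         column_name (str): The original column name
--
--     Returns:
--         str: The meta age band category
--     """
--     # Strip prefix for cleaner processing
--     cleaned_name = column_name.replace('perc_CONSTRUCTION_AGE_BAND_', '')
--
--     # Handle special categories first
--     if any(x in cleaned_name for x in ['unknown', 'NO DATA!', 'INVALID!']):
--         return 'age_band_unknown'
--
--     # Handle official England and Wales bands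
--     if 'England and Wales:' in cleaned_name:
--         year_part = cleaned_name.split(':')[1].strip()
--
--         # Map official bands
--         if 'before 1900' in year_part:
--             return 'perc_age_band_pre1900'
--         elif '1900-1929' in year_part:
--             return 'perc_age_band_1900_1929'
--         elif '1930-1949' in year_part:
--             return 'perc_age_band_1930_1949'
--         elif '1950-1966' in year_part:
--             return 'perc_age_band_1950_1966'
--         elif any(x in year_part for x in ['1967-1975', '1976-1982']):
--             return 'perc_age_band_1967_1982'
--         elif any(x in year_part for x in ['1983-1990', '1991-1995', '1996-2002']):
--             return 'perc_age_band_1983_2002'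
--         elif any(x in year_part for x in ['2003-2006', '2007 onwards', '2007-2011', '2012 onwards']):
--             return 'perc_age_band_2003_present'
--
--     # Handle individual years
--     try:
--         year = int(''.join(filter(str.isdigit, cleaned_name)))
--
--         if year < 1900:
--             return 'perc_age_band_pre1900'
--         elif 1900 <= year <= 1929:
--             return 'perc_age_band_1900_1929'
--         elif 1930 <= year <= 1949:
--             return 'perc_age_band_1930_1949'
--         elif 1950 <= year <= 1966:
--             return 'perc_age_band_1950_1966'
--         elif 1967 <= year <= 1982:
--             return 'perc_age_band_1967_1982'
--         elif 1983 <= year <= 2002: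
--             return 'perc_age_band_1983_2002'
--         elif 2003 <= year:
--             return 'perc_age_band_2003_present'
--
--     except ValueError:
--         return 'perc_age_band_unknown'  # If we can't parse a year
--
--     return 'perc_age_band_unknown'  # Fallback for any unhandled cases
-- ===== SOURCE B (Python) =====
-- # Single numeric classifier shared by both paths: the England-and-Wales bands are
-- # mapped to a representative start year and classified by the same range logic as
-- # individual years; the range logic itself is index-by-counting into a label table.
--
-- LABELS = ['perc_age_band_pre1900', 'perc_age_band_1900_1929', 'perc_age_band_1930_1949',
--           'perc_age_band_1950_1966', 'perc_age_band_1967_1982', 'perc_age_band_1983_2002',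
--           'perc_age_band_2003_present']
-- BOUNDS = (1900, 1930, 1950, 1967, 1983, 2003)
--
-- EW_START = {'before 1900': 1800, '1900-1929': 1900, '1930-1949': 1930, '1950-1966': 1950,
--             '1967-1975': 1967, '1976-1982': 1976, '1983-1990': 1983, '1991-1995': 1991,
--             '1996-2002': 1996, '2003-2006': 2003, '2007 onwards': 2007, '2007-2011': 2007,
--             '2012 onwards': 2012}
--
--
-- def _classify(year):
--     return LABELS[sum(year >= b for b in BOUNDS)]
--
--
-- def map_to_meta_age_band(column_name):
--     cleaned = column_name.replace('perc_CONSTRUCTION_AGE_BAND_', '')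
--
--     if 'unknown' in cleaned or 'NO DATA!' in cleaned or 'INVALID!' in cleaned:
--         return 'age_band_unknown'
--
--     if 'England and Wales:' in cleaned:
--         year_part = cleaned.split(':')[1].strip()
--         rep = next((y for p, y in EW_START.items() if p in year_part), None)
--         if rep is not None:
--             return _classify(rep)
--
--     digits = ''.join(c for c in cleaned if c.isdigit())
--     if not digits:
--         return 'perc_age_band_unknown'
--     return _classify(int(digits))
-- ===== Notes on version B (the rewrite author's own statement) =====
-- stated objective: simpler
-- what changed: Collapses A's two elif chains into one shared numeric classifier (label-table indexing by counting passed range bounds), with each England-and-Wales band pattern mapped to a representative start year and fed to that same classifier instead of having its own branch.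
import Mathlib
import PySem

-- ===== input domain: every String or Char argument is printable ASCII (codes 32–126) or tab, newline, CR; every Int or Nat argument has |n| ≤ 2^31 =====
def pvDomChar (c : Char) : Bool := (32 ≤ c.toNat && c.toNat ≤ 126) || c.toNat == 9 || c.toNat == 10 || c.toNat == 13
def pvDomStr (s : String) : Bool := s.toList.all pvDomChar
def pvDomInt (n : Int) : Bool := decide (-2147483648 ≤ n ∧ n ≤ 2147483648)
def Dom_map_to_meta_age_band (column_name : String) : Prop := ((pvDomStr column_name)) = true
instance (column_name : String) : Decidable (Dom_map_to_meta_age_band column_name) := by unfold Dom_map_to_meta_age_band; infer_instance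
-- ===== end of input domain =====

-- B collapses A's two elif chains into one shared numeric classifier (label table indexed
-- by counting passed bounds), feeding each England-and-Wales band its start year (objective: simpler).

-- ===== PORT A =====
-- literal transliteration of A; the England-and-Wales elif chain is an Option
-- (none = fall through to the year logic), and int(...) in the try is PySem.Int.ofStr?
-- (none = ValueError).  split(':')[1] is guarded by the 'England and Wales:' test,
-- so the .getD "" default is never taken.
def map_to_meta_age_band (column_name : String) : String :=
  let cleaned := PySem.Str.replace column_name "perc_CONSTRUCTION_AGE_BAND_" ""
  if (["unknown", "NO DATA!", "INVALID!"].any fun x => PySem.Str.isIn x cleaned) then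
    "age_band_unknown"
  else
    let ew : Option String :=
      if PySem.Str.isIn "England and Wales:" cleaned then
        let year_part := PySem.Str.strip ((PySem.List.pyGet? ((PySem.Str.split? cleaned ":").getD []) 1).getD "")
        if PySem.Str.isIn "before 1900" year_part then some "perc_age_band_pre1900"
        else if PySem.Str.isIn "1900-1929" year_part then some "perc_age_band_1900_1929"
        else if PySem.Str.isIn "1930-1949" year_part then some "perc_age_band_1930_1949"
        else if PySem.Str.isIn "1950-1966" year_part then some "perc_age_band_1950_1966"
        else if (["1967-1975", "1976-1982"].any fun x => PySem.Str.isIn x year_part) then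
          some "perc_age_band_1967_1982"
        else if (["1983-1990", "1991-1995", "1996-2002"].any fun x => PySem.Str.isIn x year_part) then
          some "perc_age_band_1983_2002"
        else if (["2003-2006", "2007 onwards", "2007-2011", "2012 onwards"].any fun x => PySem.Str.isIn x year_part) then
          some "perc_age_band_2003_present"
        else none
      else none
    match ew with
    | some r => r
    | none =>
      match PySem.Int.ofStr? (String.ofList (cleaned.toList.filter PySem.Chars.isdigit)) with
      | none => "perc_age_band_unknown"
      | some year =>
        if year < 1900 then "perc_age_band_pre1900"
        else if 1900 ≤ year ∧ year ≤ 1929 then "perc_age_band_1900_1929"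
        else if 1930 ≤ year ∧ year ≤ 1949 then "perc_age_band_1930_1949"
        else if 1950 ≤ year ∧ year ≤ 1966 then "perc_age_band_1950_1966"
        else if 1967 ≤ year ∧ year ≤ 1982 then "perc_age_band_1967_1982"
        else if 1983 ≤ year ∧ year ≤ 2002 then "perc_age_band_1983_2002"
        else if 2003 ≤ year then "perc_age_band_2003_present"
        else "perc_age_band_unknown"

-- ===== PORT B =====
def pvLabels : List String :=
  ["perc_age_band_pre1900", "perc_age_band_1900_1929", "perc_age_band_1930_1949",
   "perc_age_band_1950_1966", "perc_age_band_1967_1982", "perc_age_band_1983_2002",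
   "perc_age_band_2003_present"]

def pvBounds : List Int := [1900, 1930, 1950, 1967, 1983, 2003]

-- EW_START dict: ordered (pattern, representative start year) pairs
def pvEwStart : List (String × Int) :=
  [("before 1900", 1800), ("1900-1929", 1900), ("1930-1949", 1930), ("1950-1966", 1950),
   ("1967-1975", 1967), ("1976-1982", 1976), ("1983-1990", 1983), ("1991-1995", 1991),
   ("1996-2002", 1996), ("2003-2006", 2003), ("2007 onwards", 2007), ("2007-2011", 2007),
   ("2012 onwards", 2012)]

-- _classify: LABELS[sum(year >= b for b in BOUNDS)]; the index is always 0..6,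
-- so the .getD "" (Python's IndexError) default is never taken.
def pvClassify (year : Int) : String :=
  (PySem.List.pyGet? pvLabels
    (pvBounds.foldl (fun n b => n + (if b ≤ year then 1 else 0)) (0 : Int))).getD ""

-- next((y for p, y in EW_START.items() if p in year_part), None)
def pvFindRep (year_part : String) : List (String × Int) → Option Int
  | [] => none
  | (p, y) :: rest =>
    if PySem.Str.isIn p year_part then some y else pvFindRep year_part rest

-- int(digits) on a nonempty all-digit string never raises in Python; the none branch
-- of the guarded parse is unreachable and only totalizes the port.
def map_to_meta_age_band_alt (column_name : String) : String :=
  let cleaned := PySem.Str.replace column_name "perc_CONSTRUCTION_AGE_BAND_" ""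
  if PySem.Str.isIn "unknown" cleaned || PySem.Str.isIn "NO DATA!" cleaned
      || PySem.Str.isIn "INVALID!" cleaned then
    "age_band_unknown"
  else
    let rep : Option Int :=
      if PySem.Str.isIn "England and Wales:" cleaned then
        pvFindRep (PySem.Str.strip ((PySem.List.pyGet? ((PySem.Str.split? cleaned ":").getD []) 1).getD "")) pvEwStart
      else none
    match rep with
    | some y => pvClassify y
    | none =>
      let digits := cleaned.toList.filter PySem.Chars.isdigit
      if digits.isEmpty then "perc_age_band_unknown"
      else
        match PySem.Int.ofStr? (String.ofList digits) with
        | some year => pvClassify year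
        | none => "perc_age_band_unknown"

-- ===== PRECONDITION & SPEC =====
def Spec_map_to_meta_age_band (column_name : String) (out : String) : Prop := out = map_to_meta_age_band_alt column_name
instance (column_name : String) (out : String) : Decidable (Spec_map_to_meta_age_band column_name out) := by unfold Spec_map_to_meta_age_band; infer_instance

-- ===== CLAIM (what is proved, stated in full; the proofs are below) =====
def Claim_equal_map_to_meta_age_band : Prop := ∀ (column_name : String), Dom_map_to_meta_age_band column_name → Spec_map_to_meta_age_band column_name (map_to_meta_age_band column_name)

-- ===== LEMMAS AND PROOFS =====

-- B's counting classifier equals A's year elif chain, for every integer year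
set_option maxHeartbeats 1000000 in
theorem pvClassify_eq (y : Int) :
    pvClassify y =
      (if y < 1900 then "perc_age_band_pre1900"
       else if 1900 ≤ y ∧ y ≤ 1929 then "perc_age_band_1900_1929"
       else if 1930 ≤ y ∧ y ≤ 1949 then "perc_age_band_1930_1949"
       else if 1950 ≤ y ∧ y ≤ 1966 then "perc_age_band_1950_1966"
       else if 1967 ≤ y ∧ y ≤ 1982 then "perc_age_band_1967_1982"
       else if 1983 ≤ y ∧ y ≤ 2002 then "perc_age_band_1983_2002"
       else if 2003 ≤ y then "perc_age_band_2003_present"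
       else "perc_age_band_unknown") := by
  unfold pvClassify pvBounds pvLabels
  simp only [List.foldl]
  split_ifs <;> first | rfl | (exfalso; omega)

-- B's single pattern scan (patterns mapped to start years, then classified)
-- equals A's England-and-Wales elif chain, for every year_part
theorem pvFindRep_classify_eq (yp : String) :
    (match pvFindRep yp pvEwStart with
     | some y => some (pvClassify y)
     | none => none) =
      (if PySem.Str.isIn "before 1900" yp then some "perc_age_band_pre1900"
       else if PySem.Str.isIn "1900-1929" yp then some "perc_age_band_1900_1929"
       else if PySem.Str.isIn "1930-1949" yp then some "perc_age_band_1930_1949"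
       else if PySem.Str.isIn "1950-1966" yp then some "perc_age_band_1950_1966"
       else if (["1967-1975", "1976-1982"].any fun x => PySem.Str.isIn x yp) then
         some "perc_age_band_1967_1982"
       else if (["1983-1990", "1991-1995", "1996-2002"].any fun x => PySem.Str.isIn x yp) then
         some "perc_age_band_1983_2002"
       else if (["2003-2006", "2007 onwards", "2007-2011", "2012 onwards"].any fun x => PySem.Str.isIn x yp) then
         some "perc_age_band_2003_present"
       else none) := by
  have c0 : pvClassify 1800 = "perc_age_band_pre1900" := by rfl
  have c1 : pvClassify 1900 = "perc_age_band_1900_1929" := by rfl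
  have c2 : pvClassify 1930 = "perc_age_band_1930_1949" := by rfl
  have c3 : pvClassify 1950 = "perc_age_band_1950_1966" := by rfl
  have c4 : pvClassify 1967 = "perc_age_band_1967_1982" := by rfl
  have c5 : pvClassify 1976 = "perc_age_band_1967_1982" := by rfl
  have c6 : pvClassify 1983 = "perc_age_band_1983_2002" := by rfl
  have c7 : pvClassify 1991 = "perc_age_band_1983_2002" := by rfl
  have c8 : pvClassify 1996 = "perc_age_band_1983_2002" := by rfl
  have c9 : pvClassify 2003 = "perc_age_band_2003_present" := by rfl
  have c10 : pvClassify 2007 = "perc_age_band_2003_present" := by rfl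
  have c11 : pvClassify 2012 = "perc_age_band_2003_present" := by rfl
  cases h0 : PySem.Str.isIn "before 1900" yp with
  | true => simp only [pvFindRep, pvEwStart, List.any_cons, List.any_nil, Bool.or_false, reduceIte, h0]; simp [*]
  | false =>
    cases h1 : PySem.Str.isIn "1900-1929" yp with
    | true => simp only [pvFindRep, pvEwStart, List.any_cons, List.any_nil, Bool.or_false, reduceIte, h0, h1]; simp [*]
    | false =>
      cases h2 : PySem.Str.isIn "1930-1949" yp with
      | true => simp only [pvFindRep, pvEwStart, List.any_cons, List.any_nil, Bool.or_false, reduceIte, h0, h1, h2]; simp [*]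
      | false =>
        cases h3 : PySem.Str.isIn "1950-1966" yp with
        | true => simp only [pvFindRep, pvEwStart, List.any_cons, List.any_nil, Bool.or_false, reduceIte, h0, h1, h2, h3]; simp [*]
        | false =>
          cases h4 : PySem.Str.isIn "1967-1975" yp with
          | true => simp only [pvFindRep, pvEwStart, List.any_cons, List.any_nil, Bool.or_false, reduceIte, h0, h1, h2, h3, h4]; simp [*]
          | false =>
            cases h5 : PySem.Str.isIn "1976-1982" yp with
            | true => simp only [pvFindRep, pvEwStart, List.any_cons, List.any_nil, Bool.or_false, reduceIte, h0, h1, h2, h3, h4, h5]; simp [*]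
            | false =>
              cases h6 : PySem.Str.isIn "1983-1990" yp with
              | true => simp only [pvFindRep, pvEwStart, List.any_cons, List.any_nil, Bool.or_false, reduceIte, h0, h1, h2, h3, h4, h5, h6]; simp [*]
              | false =>
                cases h7 : PySem.Str.isIn "1991-1995" yp with
                | true => simp only [pvFindRep, pvEwStart, List.any_cons, List.any_nil, Bool.or_false, reduceIte, h0, h1, h2, h3, h4, h5, h6, h7]; simp [*]
                | false =>
                  cases h8 : PySem.Str.isIn "1996-2002" yp with
                  | true => simp only [pvFindRep, pvEwStart, List.any_cons, List.any_nil, Bool.or_false, reduceIte, h0, h1, h2, h3, h4, h5, h6, h7, h8]; simp [*]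
                  | false =>
                    cases h9 : PySem.Str.isIn "2003-2006" yp with
                    | true => simp only [pvFindRep, pvEwStart, List.any_cons, List.any_nil, Bool.or_false, reduceIte, h0, h1, h2, h3, h4, h5, h6, h7, h8, h9]; simp [*]
                    | false =>
                      cases h10 : PySem.Str.isIn "2007 onwards" yp with
                      | true => simp only [pvFindRep, pvEwStart, List.any_cons, List.any_nil, Bool.or_false, reduceIte, h0, h1, h2, h3, h4, h5, h6, h7, h8, h9, h10]; simp [*]
                      | false =>
                        cases h11 : PySem.Str.isIn "2007-2011" yp with
                        | true => simp only [pvFindRep, pvEwStart, List.any_cons, List.any_nil, Bool.or_false, reduceIte, h0, h1, h2, h3, h4, h5, h6, h7, h8, h9, h10, h11]; simp [*]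
                        | false =>
                          cases h12 : PySem.Str.isIn "2012 onwards" yp with
                          | true => simp only [pvFindRep, pvEwStart, List.any_cons, List.any_nil, Bool.or_false, reduceIte, h0, h1, h2, h3, h4, h5, h6, h7, h8, h9, h10, h11, h12]; simp [*]
                          | false =>
                            simp only [pvFindRep, pvEwStart, List.any_cons, List.any_nil, Bool.or_false, h0, h1, h2, h3, h4, h5, h6, h7, h8, h9, h10, h11, h12]; simp [*]

-- the year tail: A's try/int/elif chain equals B's emptiness-guarded parse + classifier
theorem pvTail_eq (ds : List Char) :
    (match PySem.Int.ofStr? (String.ofList ds) with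
     | none => "perc_age_band_unknown"
     | some year =>
       if year < 1900 then "perc_age_band_pre1900"
       else if 1900 ≤ year ∧ year ≤ 1929 then "perc_age_band_1900_1929"
       else if 1930 ≤ year ∧ year ≤ 1949 then "perc_age_band_1930_1949"
       else if 1950 ≤ year ∧ year ≤ 1966 then "perc_age_band_1950_1966"
       else if 1967 ≤ year ∧ year ≤ 1982 then "perc_age_band_1967_1982"
       else if 1983 ≤ year ∧ year ≤ 2002 then "perc_age_band_1983_2002"
       else if 2003 ≤ year then "perc_age_band_2003_present"
       else "perc_age_band_unknown") =
    (if ds.isEmpty then "perc_age_band_unknown"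
     else
       match PySem.Int.ofStr? (String.ofList ds) with
       | some year => pvClassify year
       | none => "perc_age_band_unknown") := by
  cases hds : ds with
  | nil => rfl
  | cons c cs =>
    simp only [List.isEmpty_cons, Bool.false_eq_true, if_false]
    cases h : PySem.Int.ofStr? (String.ofList (c :: cs)) with
    | none => rfl
    | some year => simp [pvClassify_eq]

-- ===== VERDICT (by name: the statement is the Claim_ definition above) =====
theorem map_to_meta_age_band_spec : Claim_equal_map_to_meta_age_band := by
  intro s _
  unfold Spec_map_to_meta_age_band map_to_meta_age_band map_to_meta_age_band_alt
  simp only [List.any_cons, List.any_nil, Bool.or_false, Bool.or_assoc]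
  generalize PySem.Str.replace s "perc_CONSTRUCTION_AGE_BAND_" "" = cl
  by_cases hsp : (PySem.Str.isIn "unknown" cl
      || (PySem.Str.isIn "NO DATA!" cl || PySem.Str.isIn "INVALID!" cl)) = true
  · simp only [hsp, if_true]
  · simp only [hsp, Bool.false_eq_true, if_false]
    generalize PySem.Str.strip ((PySem.List.pyGet? ((PySem.Str.split? cl ":").getD []) 1).getD "") = yp
    by_cases hew : PySem.Str.isIn "England and Wales:" cl = true
    · simp only [hew, if_true]
      have h' := pvFindRep_classify_eq yp
      simp only [List.any_cons, List.any_nil, Bool.or_false] at h'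
      rw [← h']
      cases h : pvFindRep yp pvEwStart with
      | some y => rfl
      | none => exact pvTail_eq _
    · simp only [hew, Bool.false_eq_true, if_false]
      exact pvTail_eq _
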